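-- pv_equiv track=rewrite | github.com/kgaudium/Tozama_Daimyo_Michi | fight.py | find_free_position
-- ===== SOURCE A (Python) =====
-- def find_free_position(lst):
--     if lst.count(0) == 0:
--         return None
--
--     center = len(lst) // 2
--     if lst[center] == 0:
--         return center
--
--     if len(lst) % 2 == 1:
--         for i in range(1, center + 1):
--             if lst[center - i] == 0:
--                 return center - i
--             elif lst[center + i] == 0:
--                 return center + i
--
--     else:
--         for i in range(1, center + 1):
--             if lst[center - i] == 0:
--                 return center - i
--             elif lst[center + i] == 0:
--                 return center + i
-- ===== SOURCE B (Python) =====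
-- def find_free_position(lst):
--     center = len(lst) // 2
--     zeros = [i for i, v in enumerate(lst) if v == 0]
--     if not zeros:
--         return None
--     return min(zeros, key=lambda i: (abs(i - center), i))
-- ===== Notes on version B (the rewrite author's own statement) =====
-- stated objective: simpler
-- what changed: Replaces A's expanding center-out scan with duplicated odd/even loops by one collect pass (indices of zeros) followed by min with key (abs(i-center), i).
import Mathlib
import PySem

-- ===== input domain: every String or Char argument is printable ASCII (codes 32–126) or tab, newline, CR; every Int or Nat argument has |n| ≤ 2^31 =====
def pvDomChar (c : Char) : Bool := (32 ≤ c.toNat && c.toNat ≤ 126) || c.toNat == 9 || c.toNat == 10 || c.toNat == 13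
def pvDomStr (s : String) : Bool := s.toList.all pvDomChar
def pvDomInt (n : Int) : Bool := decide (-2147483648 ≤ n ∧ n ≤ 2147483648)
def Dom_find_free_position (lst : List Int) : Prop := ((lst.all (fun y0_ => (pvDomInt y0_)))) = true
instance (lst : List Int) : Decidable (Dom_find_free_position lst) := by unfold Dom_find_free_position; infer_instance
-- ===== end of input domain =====

-- B replaces A's expanding center-out scan (with duplicated odd/even loops) by a collect pass
-- over the zero indices followed by a single min with key (abs(i-center), i); objective: simpler.

-- ===== PORT A =====
-- A's inner for-loop over range(1, center+1), checking center-i then center+i.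
-- A pyGet? result of none (Python IndexError) is treated as a failed probe; it is provably
-- unreachable from find_free_position (a zero always exists when the loop runs and is found first).
def ffpScan (lst : List Int) (center : Int) : List Int → Option Int
  | [] => none
  | i :: rest =>
    if PySem.List.pyGet? lst (center - i) = some 0 then some (center - i)
    else if PySem.List.pyGet? lst (center + i) = some 0 then some (center + i)
    else ffpScan lst center rest

def find_free_position (lst : List Int) : Option Int :=
  if PySem.List.count lst 0 = 0 then none
  else
    let center : Int := PySem.Int.floordiv (PySem.List.len lst) 2
    if PySem.List.pyGet? lst center = some 0 then some center
    else if PySem.Int.mod (PySem.List.len lst) 2 = 1 then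
      ffpScan lst center (PySem.List.pyRange 1 (center + 1) 1)
    else
      ffpScan lst center (PySem.List.pyRange 1 (center + 1) 1)

-- ===== PORT B =====
-- zeros = [i for i, v in enumerate(lst) if v == 0]
def ffpZeros (lst : List Int) : List Int :=
  (PySem.List.enumerate lst).filterMap (fun p => if p.2 = 0 then some p.1 else none)

def find_free_position_alt (lst : List Int) : Option Int :=
  let center : Int := PySem.Int.floordiv (PySem.List.len lst) 2
  let zeros := ffpZeros lst
  if zeros = [] then none
  else PySem.List.min2? zeros (fun i => |i - center|) (fun i => i)

-- ===== PRECONDITION & SPEC =====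
def Spec_find_free_position (lst : List Int) (out : Option Int) : Prop := out = find_free_position_alt lst
instance (lst : List Int) (out : Option Int) : Decidable (Spec_find_free_position lst out) := by unfold Spec_find_free_position; infer_instance

-- ===== CLAIM (what is proved, stated in full; the proofs are below) =====
def Claim_equal_find_free_position : Prop := ∀ (lst : List Int), Dom_find_free_position lst → Spec_find_free_position lst (find_free_position lst)

-- ===== LEMMAS AND PROOFS =====

theorem mem_ffpZeros (lst : List Int) (j : Int) :
    j ∈ ffpZeros lst ↔ 0 ≤ j ∧ PySem.List.pyGet? lst j = some 0 := by
  unfold ffpZeros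
  simp only [List.mem_filterMap, PySem.List.mem_enumerate_iff]
  constructor
  · rintro ⟨p, ⟨k, hk, rfl⟩, hp⟩
    simp only [zero_add] at *
    split at hp
    · rename_i hz
      cases hp
      refine ⟨by positivity, ?_⟩
      rw [PySem.List.pyGet?_natCast]
      simp [List.getElem?_eq_getElem hk, hz]
    · cases hp
  · rintro ⟨hj, hget⟩
    rw [PySem.List.pyGet?_of_nonneg lst hj] at hget
    rw [List.getElem?_eq_some_iff] at hget
    obtain ⟨hk, hz⟩ := hget
    refine ⟨(j.toNat, (0:Int)), ⟨j.toNat, hk, ?_⟩, by simp [Int.toNat_of_nonneg hj]⟩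
    simp [hz, Int.toNat_of_nonneg hj]

-- lexicographic strict order on the key (k1 y, k2 y)
def ffpLex (k1 k2 : Int → Int) (m y : Int) : Prop :=
  k1 m < k1 y ∨ (k1 m = k1 y ∧ k2 m < k2 y)

theorem min2?_foldl_aux (k1 k2 : Int → Int) (m : Int) (f : Option Int → Int → Option Int)
    (hf0 : ∀ x, f none x = some x)
    (hf1 : ∀ mm x, f (some mm) x =
      if (decide (k1 x < k1 mm) || !decide (k1 mm < k1 x) && decide (k2 x < k2 mm)) = true
      then some x else some mm) :
    ∀ (xs : List Int) (acc : Option Int),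
      (∀ y ∈ xs, y = m ∨ ffpLex k1 k2 m y) →
      (acc = some m ∨ (m ∈ xs ∧ ∀ a, acc = some a → ffpLex k1 k2 m a)) →
      List.foldl f acc xs = some m := by
  intro xs
  induction xs with
  | nil =>
    intro acc _ hacc
    rcases hacc with h | ⟨hm, _⟩
    · simpa using h
    · cases hm
  | cons x t ih =>
    intro acc hall hacc
    simp only [List.foldl_cons]
    have hx := hall x (by simp)
    have hnobeat : ∀ y, (y = m ∨ ffpLex k1 k2 m y) → f (some m) y = some m := by
      intro y hy
      rw [hf1]
      rcases hy with rfl | hlex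
      · simp
      · rcases hlex with h | ⟨he, h2⟩
        · have h1 : ¬ k1 y < k1 m := not_lt.mpr (le_of_lt h)
          simp [h1, h]
        · have h1 : ¬ k1 y < k1 m := by omega
          have h3 : ¬ k1 m < k1 y := by omega
          have h4 : ¬ k2 y < k2 m := not_lt.mpr (le_of_lt h2)
          simp [h1, h3, h4]
    have hmt_of : x ≠ m → m ∈ x :: t → m ∈ t := by
      intro hxm hm
      rcases List.mem_cons.mp hm with rfl | h
      · exact absurd rfl hxm
      · exact h
    rcases hacc with rfl | ⟨hm, ha⟩
    · -- acc = some m : nothing ever beats m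
      rw [hnobeat x hx]
      apply ih
      · intro y hy; exact hall y (by simp [hy])
      · left; rfl
    · cases acc with
      | none =>
        rw [hf0]
        rcases hx with rfl | hlex
        · apply ih
          · intro y hy; exact hall y (by simp [hy])
          · left; rfl
        · have hxm : x ≠ m := by
            rintro rfl
            rcases hlex with h | ⟨_, h2⟩
            · exact lt_irrefl _ h
            · exact lt_irrefl _ h2
          apply ih
          · intro y hy; exact hall y (by simp [hy])
          · right
            refine ⟨hmt_of hxm hm, ?_⟩
            rintro a ha'
            cases ha'
            exact hlex
      | some b =>
        have hlb := ha b rfl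
        rw [hf1]
        rcases hx with rfl | hlex
        · -- x = m arrives: m beats b (which is lex-dominated)
          have hbeat : (decide (k1 x < k1 b) || !decide (k1 b < k1 x) && decide (k2 x < k2 b)) = true := by
            rcases hlb with h | ⟨he, h2⟩
            · simp [h]
            · have h3 : ¬ k1 b < k1 x := by omega
              simp [h3, h2]
          rw [hbeat]
          simp only [if_true]
          apply ih
          · intro y hy; exact hall y (by simp [hy])
          · left; rfl
        · have hxm : x ≠ m := by
            rintro rfl
            rcases hlex with h | ⟨_, h2⟩
            · exact lt_irrefl _ h
            · exact lt_irrefl _ h2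
          have hres : (if (decide (k1 x < k1 b) || !decide (k1 b < k1 x) && decide (k2 x < k2 b)) = true
              then some x else some b) = some x ∨
              (if (decide (k1 x < k1 b) || !decide (k1 b < k1 x) && decide (k2 x < k2 b)) = true
              then some x else some b) = some b := by
            split
            · exact Or.inl rfl
            · exact Or.inr rfl
          apply ih
          · intro y hy; exact hall y (by simp [hy])
          · right
            refine ⟨hmt_of hxm hm, ?_⟩
            intro a ha'
            rcases hres with h | h <;> rw [h] at ha' <;> cases ha'
            · exact hlex
            · exact hlb

theorem min2?_eq_of_lex (k1 k2 : Int → Int) (xs : List Int) (m : Int) (hm : m ∈ xs)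
    (h : ∀ y ∈ xs, y ≠ m → ffpLex k1 k2 m y) :
    PySem.List.min2? xs k1 k2 = some m := by
  unfold PySem.List.min2?
  apply min2?_foldl_aux k1 k2 m _ (fun _ => rfl) (fun _ _ => rfl) xs none
  · intro y hy
    by_cases hym : y = m
    · exact Or.inl hym
    · exact Or.inr (h y hy hym)
  · exact Or.inr ⟨hm, by intro a ha; cases ha⟩

-- bounds for center = len(lst) // 2
theorem center_bounds (lst : List Int) :
    0 ≤ PySem.Int.floordiv (PySem.List.len lst) 2 ∧
    2 * PySem.Int.floordiv (PySem.List.len lst) 2 ≤ (lst.length : Int) ∧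
    (lst.length : Int) ≤ 2 * PySem.Int.floordiv (PySem.List.len lst) 2 + 1 := by
  unfold PySem.Int.floordiv PySem.List.len
  rw [Int.fdiv_eq_ediv]
  omega

-- index bound from a successful get
theorem inRange_of_pyGet?_eq_some (lst : List Int) (j : Int) (h : PySem.List.pyGet? lst j = some 0) :
    -(lst.length : Int) ≤ j ∧ j < (lst.length : Int) := by
  have : ¬ PySem.List.pyGet? lst j = none := by simp [h]
  rw [PySem.List.pyGet?_eq_none_iff] at this
  unfold PySem.Raise.InRange at this
  omega

-- the main loop characterisation: if all indices at distance < k from the center are nonzero,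
-- A's scan from offset k on returns exactly B's key-minimum of the zero indices
theorem scan_eq (lst : List Int) (c : Int)
    (hc0 : 0 ≤ c) (hc1 : 2 * c ≤ (lst.length : Int)) (hc2 : (lst.length : Int) ≤ 2 * c + 1) :
    ∀ (d : Nat) (k : Int), (c + 1 - k).toNat = d → 1 ≤ k →
      (∀ j : Int, |j - c| < k → PySem.List.pyGet? lst j ≠ some 0) →
      ffpScan lst c (PySem.List.pyRange k (c + 1) 1) =
        PySem.List.min2? (ffpZeros lst) (fun i => |i - c|) (fun i => i) := by
  intro d
  induction d with
  | zero =>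
    intro k hd hk hprev
    have hkc : c + 1 ≤ k := by omega
    rw [PySem.List.pyRange_one_eq_nil hkc]
    have hz : ffpZeros lst = [] := by
      by_contra hne
      obtain ⟨j, hj⟩ := List.exists_mem_of_ne_nil _ hne
      rw [mem_ffpZeros] at hj
      obtain ⟨hj0, hjget⟩ := hj
      have hr := inRange_of_pyGet?_eq_some lst j hjget
      have : |j - c| < k := by
        rcases abs_cases (j - c) with ⟨he, _⟩ | ⟨he, _⟩ <;> omega
      exact hprev j this hjget
    rw [hz]
    rfl
  | succ d ih =>
    intro k hd hk hprev
    have hkc : k < c + 1 := by omega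
    rw [PySem.List.pyRange_one_cons hkc]
    unfold ffpScan
    by_cases hL : PySem.List.pyGet? lst (c - k) = some 0
    · rw [if_pos hL]
      symm
      apply min2?_eq_of_lex
      · rw [mem_ffpZeros]; exact ⟨by omega, hL⟩
      · intro y hy hne
        rw [mem_ffpZeros] at hy
        obtain ⟨hy0, hyget⟩ := hy
        have hnotclose : ¬ |y - c| < k := fun h => hprev y h hyget
        have habs : |c - k - c| = k := by
          rw [abs_of_nonpos (by omega)]; omega
        show |c - k - c| < |y - c| ∨ (|c - k - c| = |y - c| ∧ c - k < y)
        rw [habs]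
        rcases lt_or_eq_of_le (not_lt.mp hnotclose) with h | h
        · left; exact h
        · right
          refine ⟨h, ?_⟩
          rcases abs_cases (y - c) with ⟨he, _⟩ | ⟨he, _⟩ <;> omega
    · rw [if_neg hL]
      by_cases hR : PySem.List.pyGet? lst (c + k) = some 0
      · rw [if_pos hR]
        symm
        apply min2?_eq_of_lex
        · rw [mem_ffpZeros]; exact ⟨by omega, hR⟩
        · intro y hy hne
          rw [mem_ffpZeros] at hy
          obtain ⟨hy0, hyget⟩ := hy
          have hnotclose : ¬ |y - c| < k := fun h => hprev y h hyget
          have hyL : y ≠ c - k := by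
            rintro rfl; exact hL hyget
          have habs : |c + k - c| = k := by
            rw [abs_of_nonneg (by omega)]; omega
          left
          show |c + k - c| < |y - c|
          rw [habs]
          rcases abs_cases (y - c) with ⟨he, _⟩ | ⟨he, _⟩ <;> omega
      · rw [if_neg hR]
        apply ih (k + 1) (by omega) (by omega)
        intro j hj
        by_cases hjk : |j - c| < k
        · exact hprev j hjk
        · have heq : |j - c| = k := by omega
          rcases abs_cases (j - c) with ⟨he, _⟩ | ⟨he, _⟩
          · have : j = c + k := by omega
            subst this; exact hR
          · have : j = c - k := by omega
            subst this; exact hL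

-- ===== VERDICT (by name: the statement is the Claim_ definition above) =====
theorem find_free_position_spec : Claim_equal_find_free_position := by
  intro lst _
  unfold Spec_find_free_position find_free_position find_free_position_alt
  obtain ⟨hc0, hc1, hc2⟩ := center_bounds lst
  set c := PySem.Int.floordiv (PySem.List.len lst) 2 with hc
  by_cases hcount : PySem.List.count lst 0 = 0
  · rw [if_pos hcount]
    have hz : ffpZeros lst = [] := by
      by_contra hne
      obtain ⟨j, hj⟩ := List.exists_mem_of_ne_nil _ hne
      rw [mem_ffpZeros] at hj
      have : (0:Int) ∈ lst := PySem.List.mem_of_pyGet?_eq_some lst hj.2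
      rw [PySem.List.count_eq] at hcount
      rw [← List.count_pos_iff] at this
      omega
    simp [hz]
  · rw [if_neg hcount]
    have hzne : ffpZeros lst ≠ [] := by
      rw [PySem.List.count_eq] at hcount
      have h0 : (0:Int) ∈ lst := by
        rw [← List.count_pos_iff]; omega
      rw [List.mem_iff_getElem] at h0
      obtain ⟨n, hn, hval⟩ := h0
      intro hnil
      have hmem : (n : Int) ∈ ffpZeros lst := by
        rw [mem_ffpZeros]
        refine ⟨by positivity, ?_⟩
        rw [PySem.List.pyGet?_natCast]
        simp [List.getElem?_eq_getElem hn, hval]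
      rw [hnil] at hmem
      cases hmem
    rw [if_neg hzne]
    by_cases hcget : PySem.List.pyGet? lst c = some 0
    · rw [if_pos hcget]
      symm
      apply min2?_eq_of_lex
      · rw [mem_ffpZeros]; exact ⟨hc0, hcget⟩
      · intro y hy hne
        left
        show |c - c| < |y - c|
        have h1 : |c - c| = 0 := by simp
        rw [h1]
        have h2 : y - c ≠ 0 := by omega
        exact abs_pos.mpr h2
    · rw [if_neg hcget]
      rw [ite_self]
      apply scan_eq lst c hc0 hc1 hc2 (c + 1 - 1).toNat 1 rfl (by omega)
      intro j hj
      have : j = c := by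
        rcases abs_cases (j - c) with ⟨he, _⟩ | ⟨he, _⟩ <;> omega
      subst this
      exact hcget
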